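-- pv_equiv track=rewrite | github.com/palmergroupUH/Order_Parameters_Library | mathlib/test/test_wigner3j.py | compute_num_paris
-- ===== SOURCE A (Python) =====
-- def compute_num_paris(l):
--
--     num_pairs = 0
--
--     m_lst = []
--
--     for i in range(-l, l+1):
--
--         for j in range(-l, l+1):
--
--             for k in range(-l, l+1):
--
--                 if (i+j+k ==0):
--
--                     num_pairs = num_pairs + 1
--
--                     m_lst.append([i,j,k])
--
--     return num_pairs, m_lst
-- ===== SOURCE B (Python) =====
-- def compute_num_paris(l):
--     m_lst = [[i, j, -(i + j)]
--              for i in range(-l, l + 1)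
--              for j in range(max(-l, -i - l), min(l, l - i) + 1)]
--     return len(m_lst), m_lst
-- ===== Notes on version B (the rewrite author's own statement) =====
-- stated objective: faster
-- what changed: B builds the triple list directly by a double comprehension whose inner j-range is clipped to exactly the j with -(i+j) in [-l,l] (no per-iteration test, no counter), and returns its length, instead of A's cubic triple loop with a membership check.
import Mathlib
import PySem

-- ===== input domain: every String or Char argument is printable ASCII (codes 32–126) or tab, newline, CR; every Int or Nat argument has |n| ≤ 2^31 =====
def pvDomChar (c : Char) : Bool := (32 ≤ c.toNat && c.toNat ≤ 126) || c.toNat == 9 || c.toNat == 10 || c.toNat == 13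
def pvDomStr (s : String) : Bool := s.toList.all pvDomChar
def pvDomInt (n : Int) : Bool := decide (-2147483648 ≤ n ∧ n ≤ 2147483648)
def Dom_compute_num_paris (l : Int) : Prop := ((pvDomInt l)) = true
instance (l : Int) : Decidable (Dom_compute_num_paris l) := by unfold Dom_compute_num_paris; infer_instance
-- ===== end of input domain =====

-- B builds the list of triples directly (for each i, the inner j-range is clipped so
-- that k = -(i+j) always lies in [-l,l]) and returns its length; objective: faster.

-- ===== PORT A =====
def compute_num_paris (l : Int) : Int × List (List Int) :=
  (PySem.List.pyRange (-l) (l+1) 1).foldl (fun s i =>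
    (PySem.List.pyRange (-l) (l+1) 1).foldl (fun s j =>
      (PySem.List.pyRange (-l) (l+1) 1).foldl (fun s k =>
        if i + j + k = 0 then (s.1 + 1, s.2 ++ [[i, j, k]]) else s) s) s) (0, [])

-- ===== PORT B =====
def compute_num_paris_alt (l : Int) : Int × List (List Int) :=
  let m_lst := (PySem.List.pyRange (-l) (l+1) 1).flatMap (fun i =>
    (PySem.List.pyRange (max (-l) (-i - l)) (min l (l - i) + 1) 1).map (fun j =>
      [i, j, -(i + j)]))
  ((m_lst.length : Int), m_lst)

-- ===== PRECONDITION & SPEC =====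
def Spec_compute_num_paris (l : Int) (out : Int × List (List Int)) : Prop := out = compute_num_paris_alt l
instance (l : Int) (out : Int × List (List Int)) : Decidable (Spec_compute_num_paris l out) := by unfold Spec_compute_num_paris; infer_instance

-- ===== CLAIM =====
def Claim_equal_compute_num_paris : Prop := ∀ (l : Int), Dom_compute_num_paris l → Spec_compute_num_paris l (compute_num_paris l)

-- ===== LEMMAS AND PROOFS =====

-- A fold that updates the state only at one designated element of a duplicate-free list
-- equals a single conditional update.
theorem pv_foldl_single {α β : Type} [DecidableEq α] (g : β → β) (t : α) :
    ∀ (L : List α), L.Nodup → ∀ (s : β),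
      L.foldl (fun s k => if k = t then g s else s) s = if t ∈ L then g s else s := by
  intro L
  induction L with
  | nil => intro _ s; simp
  | cons a L ih =>
    intro h s
    rcases List.nodup_cons.mp h with ⟨ha, hL⟩
    by_cases hat : a = t
    · subst hat
      simp [List.foldl_cons, ih hL, ha]
    · simp only [List.foldl_cons, if_neg hat, ih hL, List.mem_cons]
      by_cases ht : t ∈ L <;> simp [ht, Ne.symm hat]

-- The innermost k-loop of A collapses to a range check on k = -(i+j).
theorem pv_inner (l i j : Int) (s : Int × List (List Int)) :
    (PySem.List.pyRange (-l) (l+1) 1).foldl (fun s k =>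
        if i + j + k = 0 then (s.1 + 1, s.2 ++ [[i, j, k]]) else s) s
      = if -l ≤ -(i + j) ∧ -(i + j) ≤ l then (s.1 + 1, s.2 ++ [[i, j, -(i + j)]]) else s := by
  have hfun : (fun (s : Int × List (List Int)) (k : Int) =>
      if i + j + k = 0 then (s.1 + 1, s.2 ++ [[i, j, k]]) else s)
      = (fun s k => if k = -(i + j) then (s.1 + 1, s.2 ++ [[i, j, -(i + j)]]) else s) := by
    funext s k
    by_cases h : k = -(i + j)
    · subst h; simp
    · rw [if_neg (by omega), if_neg h]
  rw [hfun, pv_foldl_single _ _ _ (PySem.List.nodup_pyRange_one _ _) s]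
  simp only [PySem.List.mem_pyRange_one]
  by_cases h : -l ≤ -(i + j) ∧ -(i + j) ≤ l
  · rw [if_pos (by omega), if_pos h]
  · rw [if_neg (by omega), if_neg h]

-- Unconditional count-and-append fold over a list.
theorem pv_fold_append {α : Type} (f : α → List Int) :
    ∀ (L : List α) (s : Int × List (List Int)),
      L.foldl (fun s j => (s.1 + 1, s.2 ++ [f j])) s
        = (s.1 + L.length, s.2 ++ L.map f) := by
  intro L
  induction L with
  | nil => intro s; simp
  | cons a L ih => intro s; simp [ih]; omega

-- A fold whose update condition fails on every element is the identity.
theorem pv_fold_skip {α β : Type} (p : α → Prop) [DecidablePred p] (g : β → α → β) :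
    ∀ (L : List α), (∀ x ∈ L, ¬ p x) → ∀ (s : β),
      L.foldl (fun s j => if p j then g s j else s) s = s := by
  intro L
  induction L with
  | nil => intro _ s; simp
  | cons a L ih =>
    intro h s
    simp only [List.foldl_cons, if_neg (h a (by simp))]
    exact ih (fun x hx => h x (by simp [hx])) s

-- A's j-loop equals B's clipped-range map for each fixed i in [-l, l].
theorem pv_jloop (l i : Int) (hi : -l ≤ i ∧ i < l + 1) (s : Int × List (List Int)) :
    (PySem.List.pyRange (-l) (l+1) 1).foldl (fun s j =>
        if -l ≤ -(i + j) ∧ -(i + j) ≤ l then (s.1 + 1, s.2 ++ [[i, j, -(i + j)]]) else s) s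
      = (s.1 + ((PySem.List.pyRange (max (-l) (-i - l)) (min l (l - i) + 1) 1).length : Int),
         s.2 ++ (PySem.List.pyRange (max (-l) (-i - l)) (min l (l - i) + 1) 1).map
            (fun j => [i, j, -(i + j)])) := by
  have hlo : -l ≤ max (-l) (-i - l) := by omega
  have hhi : min l (l - i) + 1 ≤ l + 1 := by omega
  have hmid : max (-l) (-i - l) ≤ min l (l - i) + 1 := by omega
  rw [PySem.List.pyRange_one_append (-l) (max (-l) (-i - l)) (l+1) hlo (by omega),
      PySem.List.pyRange_one_append (max (-l) (-i - l)) (min l (l - i) + 1) (l+1) hmid hhi,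
      List.foldl_append, List.foldl_append]
  rw [pv_fold_skip (fun j => -l ≤ -(i + j) ∧ -(i + j) ≤ l) _ _
        (by intro x hx; rw [PySem.List.mem_pyRange_one] at hx; omega) s]
  have heq : ∀ (t : Int × List (List Int)),
      (PySem.List.pyRange (max (-l) (-i - l)) (min l (l - i) + 1) 1).foldl
        (fun s j => if -l ≤ -(i + j) ∧ -(i + j) ≤ l then (s.1 + 1, s.2 ++ [[i, j, -(i + j)]]) else s) t
      = (PySem.List.pyRange (max (-l) (-i - l)) (min l (l - i) + 1) 1).foldl
        (fun s j => (s.1 + 1, s.2 ++ [[i, j, -(i + j)]])) t := by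
    intro t
    apply PySem.List.foldl_congr_mem
    intro s x hx
    rw [PySem.List.mem_pyRange_one] at hx
    rw [if_pos (by omega)]
  rw [heq, pv_fold_append (fun j => [i, j, -(i + j)])]
  rw [pv_fold_skip (fun j => -l ≤ -(i + j) ∧ -(i + j) ≤ l) _ _
        (by intro x hx; rw [PySem.List.mem_pyRange_one] at hx; omega)]

-- Accumulating (count, list) over a list of blocks yields the flatMap and its length.
theorem pv_fold_flat {α : Type} (g : α → List (List Int)) :
    ∀ (L : List α) (n : Int) (acc : List (List Int)),
      L.foldl (fun s i => (s.1 + ((g i).length : Int), s.2 ++ g i)) (n, acc)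
        = (n + ((L.flatMap g).length : Int), acc ++ L.flatMap g) := by
  intro L
  induction L with
  | nil => intro n acc; simp
  | cons a L ih =>
    intro n acc
    simp only [List.foldl_cons, ih, List.flatMap_cons, List.length_append, List.append_assoc]
    refine Prod.ext ?_ rfl
    push_cast; ring

-- ===== VERDICT =====
theorem compute_num_paris_spec : Claim_equal_compute_num_paris := by
  intro l _
  unfold Spec_compute_num_paris compute_num_paris compute_num_paris_alt
  have h1 : (PySem.List.pyRange (-l) (l+1) 1).foldl (fun s i =>
      (PySem.List.pyRange (-l) (l+1) 1).foldl (fun s j =>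
        (PySem.List.pyRange (-l) (l+1) 1).foldl (fun s k =>
          if i + j + k = 0 then (s.1 + 1, s.2 ++ [[i, j, k]]) else s) s) s) ((0 : Int), ([] : List (List Int)))
      = (PySem.List.pyRange (-l) (l+1) 1).foldl (fun s i =>
          (s.1 + ((PySem.List.pyRange (max (-l) (-i - l)) (min l (l - i) + 1) 1).length : Int),
           s.2 ++ (PySem.List.pyRange (max (-l) (-i - l)) (min l (l - i) + 1) 1).map
              (fun j => [i, j, -(i + j)]))) ((0 : Int), ([] : List (List Int))) := by
    apply PySem.List.foldl_congr_mem
    intro s i hi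
    rw [PySem.List.mem_pyRange_one] at hi
    calc (PySem.List.pyRange (-l) (l+1) 1).foldl (fun s j =>
            (PySem.List.pyRange (-l) (l+1) 1).foldl (fun s k =>
              if i + j + k = 0 then (s.1 + 1, s.2 ++ [[i, j, k]]) else s) s) s
        = (PySem.List.pyRange (-l) (l+1) 1).foldl (fun s j =>
            if -l ≤ -(i + j) ∧ -(i + j) ≤ l then (s.1 + 1, s.2 ++ [[i, j, -(i + j)]]) else s) s := by
          apply PySem.List.foldl_congr_mem
          intro t j _
          exact pv_inner l i j t
      _ = _ := pv_jloop l i hi s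
  rw [h1]
  have h2 := pv_fold_flat
    (fun i => (PySem.List.pyRange (max (-l) (-i - l)) (min l (l - i) + 1) 1).map
        (fun j => [i, j, -(i + j)]))
    (PySem.List.pyRange (-l) (l+1) 1) 0 []
  simp only [List.length_map] at h2 ⊢
  rw [h2]
  simp
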